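-- pv_equiv track=rewrite | github.com/sugeeth14/leetcode-problems | 1704-determine-if-string-halves-are-alike/1704-determine-if-string-halves-are-alike.py | halvesAreAlike
-- ===== SOURCE A (Python) =====
-- def halvesAreAlike(s: str) -> bool:
--     s1 = s[:len(s)//2]
--     s2 = s[len(s)//2:]
--     vowels = "AEIOUaeiou"
--     count1 = count2 = 0
--     for char in s1:
--         if char in vowels:
--             count1 += 1
--     for char in s2:
--         if char in vowels:
--             count2 += 1
--     return count1 == count2
-- ===== SOURCE B (Python) =====
-- def halvesAreAlike(s: str) -> bool:
--     vowels = "AEIOUaeiou"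
--     mid = len(s) // 2
--     it1 = (c for c in s[:mid] if c in vowels)
--     it2 = (c for c in s[mid:] if c in vowels)
--     while True:
--         a = next(it1, None)
--         b = next(it2, None)
--         if (a is None) != (b is None):
--             return False
--         if a is None:
--             return True
-- ===== Notes on version B (the rewrite author's own statement) =====
-- stated objective: alternative
-- what changed: Instead of counting vowels in each half and comparing the two counts, B lazily streams the vowels of the two halves with generators and pairs them off one-to-one, returning False as soon as one stream runs dry before the other (early exit) and True when both end together.
import Mathlib
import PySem

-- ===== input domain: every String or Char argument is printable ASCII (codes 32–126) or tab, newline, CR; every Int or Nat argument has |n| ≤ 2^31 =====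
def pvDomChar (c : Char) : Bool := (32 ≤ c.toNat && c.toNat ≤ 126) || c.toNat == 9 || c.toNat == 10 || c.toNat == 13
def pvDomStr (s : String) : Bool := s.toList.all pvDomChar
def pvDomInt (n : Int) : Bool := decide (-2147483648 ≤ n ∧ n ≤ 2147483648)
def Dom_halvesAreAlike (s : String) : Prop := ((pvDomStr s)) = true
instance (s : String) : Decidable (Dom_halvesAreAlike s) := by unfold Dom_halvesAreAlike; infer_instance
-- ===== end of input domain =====

-- B replaces A's count-each-half-and-compare with lazy streams of the halves' vowels paired off one-to-one (early exit on imbalance); objective: alternative (same O(n) cost).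

-- ===== PORT A =====
-- literal port of A: slice the two halves, count vowels in each with its own loop, compare
def halvesAreAlike (s : String) : Bool :=
  let s1 := PySem.List.slice s.toList none (some (PySem.Int.floordiv (PySem.Str.len s) 2))
  let s2 := PySem.List.slice s.toList (some (PySem.Int.floordiv (PySem.Str.len s) 2)) none
  let vowels := "AEIOUaeiou".toList
  let count1 := s1.foldl (fun c ch => if PySem.Chars.isIn [ch] vowels then c + 1 else c) (0 : Int)
  let count2 := s2.foldl (fun c ch => if PySem.Chars.isIn [ch] vowels then c + 1 else c) (0 : Int)
  count1 == count2

-- ===== PORT B =====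
-- 'c in vowels' test shared by both generators
def pvIsVowel (c : Char) : Bool := PySem.Chars.isIn [c] "AEIOUaeiou".toList

-- next(it, None) on a generator '(c for c in l if c in vowels)': skip to the first vowel,
-- return it together with the rest of the stream (none = the generator is exhausted)
def pvNextVowel : List Char → Option (Char × List Char)
  | [] => none
  | c :: cs => if pvIsVowel c then some (c, cs) else pvNextVowel cs

theorem pvNextVowel_some_len {l : List Char} {c : Char} {t : List Char}
    (h : pvNextVowel l = some (c, t)) : t.length < l.length := by
  induction l with
  | nil => simp [pvNextVowel] at h
  | cons x xs ih =>
    by_cases hx : pvIsVowel x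
    · simp [pvNextVowel, hx] at h
      obtain ⟨-, rfl⟩ := h
      simp
    · simp [pvNextVowel, hx] at h
      simp only [List.length_cons]
      exact Nat.lt_succ_of_lt (ih h)

-- the 'while True' pairing loop: draw one vowel from each stream,
-- False as soon as exactly one stream is exhausted, True when both are
def pvPairLoop (l1 l2 : List Char) : Bool :=
  match _h1 : pvNextVowel l1, _h2 : pvNextVowel l2 with
  | none, none => true
  | none, some _ => false
  | some _, none => false
  | some (_, t1), some (_, t2) => pvPairLoop t1 t2
termination_by l1.length + l2.length
decreasing_by
  have := pvNextVowel_some_len _h1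
  have := pvNextVowel_some_len _h2
  omega

-- literal port of B: stream the vowels of the two halves, pair them off
def halvesAreAlike_alt (s : String) : Bool :=
  let mid := PySem.Int.floordiv (PySem.Str.len s) 2
  pvPairLoop (PySem.List.slice s.toList none (some mid))
             (PySem.List.slice s.toList (some mid) none)

-- ===== PRECONDITION & SPEC =====
def Spec_halvesAreAlike (s : String) (out : Bool) : Prop := out = halvesAreAlike_alt s
instance (s : String) (out : Bool) : Decidable (Spec_halvesAreAlike s out) := by unfold Spec_halvesAreAlike; infer_instance

-- ===== CLAIM (what is proved, stated in full; the proofs are below) =====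
def Claim_equal_halvesAreAlike : Prop := ∀ (s : String), Dom_halvesAreAlike s → Spec_halvesAreAlike s (halvesAreAlike s)

-- ===== LEMMAS AND PROOFS =====

-- pvNextVowel = none exactly when the stream holds no vowel
theorem pvNextVowel_none_countP {l : List Char} (h : pvNextVowel l = none) :
    l.countP pvIsVowel = 0 := by
  induction l with
  | nil => simp
  | cons x xs ih =>
    by_cases hx : pvIsVowel x
    · simp [pvNextVowel, hx] at h
    · simp [pvNextVowel, hx] at h
      have := ih h
      simp [hx, this]

-- drawing one vowel decrements the vowel count by one
theorem pvNextVowel_some_countP {l : List Char} {c : Char} {t : List Char}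
    (h : pvNextVowel l = some (c, t)) :
    l.countP pvIsVowel = t.countP pvIsVowel + 1 := by
  induction l with
  | nil => simp [pvNextVowel] at h
  | cons x xs ih =>
    by_cases hx : pvIsVowel x
    · simp [pvNextVowel, hx] at h; obtain ⟨_, rfl⟩ := h; simp [hx]
    · simp [pvNextVowel, hx] at h; simp [hx, ih h]

-- the pairing loop decides whether the two streams hold equally many vowels
theorem pvPairLoop_eq (l1 l2 : List Char) :
    pvPairLoop l1 l2 = (l1.countP pvIsVowel == l2.countP pvIsVowel) := by
  fun_induction pvPairLoop l1 l2 with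
  | case1 l1 l2 h1 h2 =>
    simp [pvNextVowel_none_countP h1, pvNextVowel_none_countP h2]
  | case2 l1 l2 p h1 h2 =>
    simp [pvNextVowel_none_countP h1, pvNextVowel_some_countP h2]
  | case3 l1 l2 p h1 h2 =>
    simp [pvNextVowel_none_countP h2, pvNextVowel_some_countP h1]
  | case4 l1 l2 c1 t1 c2 t2 h1 h2 ih =>
    rw [ih, pvNextVowel_some_countP h1, pvNextVowel_some_countP h2]
    rw [Bool.eq_iff_iff]
    simp only [beq_iff_eq]
    omega

-- ===== VERDICT (by name: the statement is the Claim_ definition above) =====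
theorem halvesAreAlike_spec : Claim_equal_halvesAreAlike := by
  intro s _
  unfold Spec_halvesAreAlike
  simp only [halvesAreAlike, halvesAreAlike_alt]
  rw [pvPairLoop_eq]
  set P : Char → Bool := fun ch => PySem.Chars.isIn [ch] "AEIOUaeiou".toList with hP
  rw [PySem.List.foldl_count_if P, PySem.List.foldl_count_if P]
  have hPv : pvIsVowel = P := rfl
  rw [hPv]
  have key : ∀ (m n : Nat), (((0:Int) + m == 0 + n)) = ((m == n)) := by
    intro m n
    rw [Bool.eq_iff_iff]
    simp only [beq_iff_eq]
    omega
  exact key _ _
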